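-- pv_equiv track=rewrite | github.com/rafaelbco/rbco.rename | rbco/rename/renaming.py | fixTitleCase
-- ===== SOURCE A (Python) =====
-- def fixTitleCase(fileName):
--     """Fix the string.title() issue with the (') character. E.g.: takes "You Don'T Know" and
--     returns "You Don't Know".
--     """
--     fileNameParts = fileName.split("'")
--     fixedParts = [fileNameParts[0]]
--
--     for part in fileNameParts[1:]:
--         if part:
--             fixedParts.append(part[0].lower() + part[1:])
--         else:
--             fixedParts.append(part)
--
--     return "'".join(fixedParts)
-- ===== SOURCE B (Python) =====
-- def fixTitleCase(fileName):
--     """Single left-to-right scan: lowercase any character that immediately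
--     follows an apostrophe, instead of splitting on "'" and re-joining."""
--     out = []
--     prev_is_quote = False
--     for ch in fileName:
--         out.append(ch.lower() if prev_is_quote else ch)
--         prev_is_quote = (ch == "'")
--     return ''.join(out)
-- ===== Notes on version B (the rewrite author's own statement) =====
-- stated objective: alternative
-- what changed: Replaces split-on-apostrophe / fix-each-part / join with a single character scan keeping a previous-char-was-apostrophe flag.
import Mathlib
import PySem

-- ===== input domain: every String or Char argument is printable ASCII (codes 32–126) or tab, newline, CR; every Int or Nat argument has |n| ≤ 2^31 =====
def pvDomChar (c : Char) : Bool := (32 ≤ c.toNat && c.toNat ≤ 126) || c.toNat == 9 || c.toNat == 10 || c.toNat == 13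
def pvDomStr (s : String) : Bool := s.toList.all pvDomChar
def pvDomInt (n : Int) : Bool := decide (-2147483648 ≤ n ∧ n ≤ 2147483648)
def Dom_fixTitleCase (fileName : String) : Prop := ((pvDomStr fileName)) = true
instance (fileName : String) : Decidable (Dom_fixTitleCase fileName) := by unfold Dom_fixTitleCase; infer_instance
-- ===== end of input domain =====

-- B replaces A's split-on-apostrophe / fix-each-part / join with a single look-behind scan (alternative decomposition, same cost).

-- ===== PORT A =====
-- fileNameParts = fileName.split("'"); fixedParts = [fileNameParts[0]];
-- for part in fileNameParts[1:]: append part[0].lower()+part[1:] if part else part;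
-- return "'".join(fixedParts).  (split always returns a nonempty list, so parts[0] is headD.)
def fixTitleCase (fileName : String) : String :=
  let parts := PySem.Chars.splitOn fileName.toList ['\'']
  let fixed := (PySem.List.slice parts (some 1) none).foldl
    (fun acc part =>
      match part with
      | c :: rest => acc ++ [PySem.Chars.lowerChar c :: rest]
      | [] => acc ++ [([] : List Char)])
    [parts.headD []]
  String.ofList (PySem.Chars.join ['\''] fixed)

-- ===== PORT B =====
-- out = []; prev_is_quote = False; for ch: out.append(ch.lower() if prev_is_quote else ch); prev_is_quote = (ch == "'"); ''.join(out)
def fixTitleCase_alt (fileName : String) : String :=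
  let st := fileName.toList.foldl
    (fun (st : List Char × Bool) ch =>
      (st.1 ++ [if st.2 then PySem.Chars.lowerChar ch else ch], ch = '\''))
    (([] : List Char), false)
  String.ofList st.1

-- ===== PRECONDITION & SPEC =====
def Spec_fixTitleCase (fileName : String) (out : String) : Prop := out = fixTitleCase_alt fileName
instance (fileName : String) (out : String) : Decidable (Spec_fixTitleCase fileName out) := by unfold Spec_fixTitleCase; infer_instance

-- ===== CLAIM (what is proved, stated in full; the proofs are below) =====
def Claim_equal_fixTitleCase : Prop := ∀ (fileName : String), Dom_fixTitleCase fileName → Spec_fixTitleCase fileName (fixTitleCase fileName)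

-- ===== LEMMAS AND PROOFS =====

-- A simple structural split on the apostrophe character (proof-side model of split("'")).
def splitQ : List Char → List (List Char)
  | [] => [[]]
  | c :: rest =>
      if c = '\'' then [] :: splitQ rest
      else
        match splitQ rest with
        | p :: ps => (c :: p) :: ps
        | [] => [[c]]

theorem splitQ_ne_nil (cs : List Char) : splitQ cs ≠ [] := by
  cases cs with
  | nil => simp [splitQ]
  | cons c rest =>
      simp only [splitQ]
      split
      · simp
      · split <;> simp

theorem splitOn_go_eq (fuel : Nat) (l cur : List Char) (accs : List (List Char))
    (h : l.length ≤ fuel) :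
    PySem.Chars.splitOn.go ['\''] fuel l cur accs =
      accs.reverse ++
        (match splitQ l with
         | p :: ps => (cur.reverse ++ p) :: ps
         | [] => [cur.reverse]) := by
  induction fuel generalizing l cur accs with
  | zero =>
      have hl : l = [] := by
        cases l with
        | nil => rfl
        | cons c r => simp at h
      subst hl
      simp [PySem.Chars.splitOn.go, splitQ]
  | succ n ih =>
      cases l with
      | nil => simp [PySem.Chars.splitOn.go, splitQ]
      | cons c rest =>
          by_cases hc : c = '\''
          · subst hc
            have hpre : (['\''] : List Char).isPrefixOf ('\'' :: rest) = true := by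
              simp [List.isPrefixOf]
            simp only [PySem.Chars.splitOn.go, hpre, if_true, List.length_singleton,
              List.drop_succ_cons, List.drop_zero]
            rw [ih rest [] (cur.reverse :: accs) (by simp at h; omega)]
            rcases hq : splitQ rest with _ | ⟨p, ps⟩
            · exact absurd hq (splitQ_ne_nil rest)
            · simp [splitQ, hq]
          · have hpre : (['\''] : List Char).isPrefixOf (c :: rest) = false := by
              simp [List.isPrefixOf]
              intro h'; exact absurd h'.symm hc
            simp only [PySem.Chars.splitOn.go, hpre, Bool.false_eq_true, if_false]
            rw [ih rest (c :: cur) accs (by simp at h; omega)]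
            rcases hq : splitQ rest with _ | ⟨p, ps⟩
            · exact absurd hq (splitQ_ne_nil rest)
            · simp [splitQ, hq, hc]

theorem splitOn_eq_splitQ (cs : List Char) :
    PySem.Chars.splitOn cs ['\''] = splitQ cs := by
  show PySem.Chars.splitOn.go ['\''] (cs.length + 1) cs [] [] = splitQ cs
  rw [splitOn_go_eq (cs.length + 1) cs [] [] (by omega)]
  rcases hq : splitQ cs with _ | ⟨p, ps⟩
  · exact absurd hq (splitQ_ne_nil cs)
  · simp

-- The per-part fix A applies to every part after the first.
def fixPart : List Char → List Char
  | [] => []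
  | c :: rest => PySem.Chars.lowerChar c :: rest

-- B's scan, as a structural recursion (what B's foldl accumulates).
def scan : Bool → List Char → List Char
  | _, [] => []
  | flag, c :: rest => (if flag then PySem.Chars.lowerChar c else c) :: scan (c = '\'') rest

theorem join_cons_char (c : Char) (p : List Char) (l : List (List Char)) :
    PySem.Chars.join ['\''] ((c :: p) :: l) = c :: PySem.Chars.join ['\''] (p :: l) := by
  cases l with
  | nil => simp [PySem.Chars.join_singleton]
  | cons q qs => simp [PySem.Chars.join_cons_cons]

theorem foldB_eq_scan (cs : List Char) (acc : List Char) (flag : Bool) :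
    (cs.foldl
      (fun (st : List Char × Bool) ch =>
        (st.1 ++ [if st.2 then PySem.Chars.lowerChar ch else ch], ch = '\''))
      (acc, flag)).1 = acc ++ scan flag cs := by
  induction cs generalizing acc flag with
  | nil => simp [scan]
  | cons c rest ih =>
      simp only [List.foldl_cons, scan]
      rw [ih]
      simp

theorem join_fix_eq_scan (cs : List Char) (flag : Bool) :
    PySem.Chars.join ['\'']
      ((if flag then fixPart ((splitQ cs).headD []) else (splitQ cs).headD []) ::
        ((splitQ cs).tail).map fixPart) = scan flag cs := by
  induction cs generalizing flag with
  | nil =>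
      cases flag <;> simp [splitQ, fixPart, scan, PySem.Chars.join_singleton]
  | cons c rest ih =>
      by_cases hc : c = '\''
      · subst hc
        rcases hq : splitQ rest with _ | ⟨p, ps⟩
        · exact absurd hq (splitQ_ne_nil rest)
        · have h1 := ih true
          rw [hq] at h1
          simp only [if_true, List.headD, List.tail] at h1
          have hl : PySem.Chars.lowerChar '\'' = '\'' := by decide
          simp only [splitQ, if_true, hq, List.headD, List.tail, List.map, scan, hl]
          have hfix : fixPart ([] : List Char) = [] := rfl
          cases flag <;>
            simp only [if_true, Bool.false_eq_true, if_false, hfix] <;>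
            · rw [PySem.Chars.join_cons_cons, h1]
              simp
      · rcases hq : splitQ rest with _ | ⟨p, ps⟩
        · exact absurd hq (splitQ_ne_nil rest)
        · have h1 := ih false
          rw [hq] at h1
          simp only [Bool.false_eq_true, if_false, List.headD, List.tail] at h1
          simp only [splitQ, hc, if_false, hq, List.headD, List.tail, scan]
          cases flag with
          | false =>
              simp only [Bool.false_eq_true, if_false]
              rw [join_cons_char, h1]
              simp
          | true =>
              simp only [if_true, fixPart]
              rw [join_cons_char, h1]
              simp

theorem foldA_eq (ps : List (List Char)) (acc : List (List Char)) :
    ps.foldl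
      (fun acc part =>
        match part with
        | c :: rest => acc ++ [PySem.Chars.lowerChar c :: rest]
        | [] => acc ++ [([] : List Char)])
      acc = acc ++ ps.map fixPart := by
  induction ps generalizing acc with
  | nil => simp
  | cons p ps ih =>
      cases p <;> simp [List.foldl_cons, fixPart, ih]

-- ===== VERDICT (by name: the statement is the Claim_ definition above) =====
theorem fixTitleCase_spec : Claim_equal_fixTitleCase := by
  intro fileName _
  unfold Spec_fixTitleCase fixTitleCase fixTitleCase_alt
  simp only [PySem.List.slice_from_one, splitOn_eq_splitQ, foldA_eq]
  rw [foldB_eq_scan]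
  have h := join_fix_eq_scan fileName.toList false
  simp only [Bool.false_eq_true, if_false] at h
  rw [List.singleton_append, h]
  simp
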